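-- pv_equiv track=rewrite | github.com/posl/comment_recommendation | script/split_gen/5_time/zh/116_C/1.py | solve
-- ===== SOURCE A (Python) =====
-- def solve(n,h):
--     ans = 0
--     for i in range(1,n+1):
--         if h[i-1] == 0:
--             continue
--         else:
--             ans += h[i-1]
--             if i != n:
--                 if h[i] != 0:
--                     ans += h[i-1]
--     return ans
-- ===== SOURCE B (Python) =====
-- def _go(xs):
--     # recursive run decomposition: each maximal run of nonzero values r
--     # contributes 2*sum(r) - r[-1]; zeros contribute nothing
--     if not xs:
--         return 0
--     if xs[0] == 0:
--         return _go(xs[1:])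
--     k = 0
--     while k < len(xs) and xs[k] != 0:
--         k += 1
--     run = xs[:k]
--     return 2 * sum(run) - run[-1] + _go(xs[k:])
--
-- def solve(n, h):
--     return _go(h[:n] if n > 0 else [])
-- ===== Notes on version B (the rewrite author's own statement) =====
-- stated objective: alternative
-- what changed: Replaces the index-driven fused accumulator loop by recursive decomposition of the prefix into maximal nonzero runs, each run r contributing 2*sum(r) - r[-1] (correct because every element of a run except its last gets the adjacency bonus).
import Mathlib
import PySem

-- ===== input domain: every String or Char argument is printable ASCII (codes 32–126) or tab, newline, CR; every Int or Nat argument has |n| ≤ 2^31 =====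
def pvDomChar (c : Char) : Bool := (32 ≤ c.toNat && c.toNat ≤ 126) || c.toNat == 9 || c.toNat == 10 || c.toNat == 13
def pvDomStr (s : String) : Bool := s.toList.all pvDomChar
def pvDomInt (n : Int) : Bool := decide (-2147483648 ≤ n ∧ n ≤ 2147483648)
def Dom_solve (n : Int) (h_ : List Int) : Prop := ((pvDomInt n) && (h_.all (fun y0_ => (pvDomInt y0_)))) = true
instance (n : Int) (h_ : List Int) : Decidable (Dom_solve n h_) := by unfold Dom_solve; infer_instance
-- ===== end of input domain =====

-- B replaces A's index-driven fused loop by recursive decomposition of the prefix into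
-- maximal nonzero runs, each run r contributing 2*sum(r) - r[-1].

-- ===== PORT A =====
def solve (n : Int) (h_ : List Int) : Int :=
  (PySem.List.pyRange 1 (n + 1) 1).foldl
    (fun ans i =>
      if PySem.List.pyGetD h_ (i - 1) 0 = 0 then
        ans
      else
        let ans := ans + PySem.List.pyGetD h_ (i - 1) 0
        if i ≠ n then
          if PySem.List.pyGetD h_ i 0 ≠ 0 then ans + PySem.List.pyGetD h_ (i - 1) 0 else ans
        else ans)
    0

-- ===== PORT B =====
-- the inner `while k < len(xs) and xs[k] != 0` split: leading nonzero run and the rest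
def pvSpan : List Int → List Int × List Int
  | [] => ([], [])
  | x :: xs => if x = 0 then ([], x :: xs) else ((x :: (pvSpan xs).1), (pvSpan xs).2)

-- termination fact for solve_go, cited in its decreasing_by
lemma pvSpan_snd_length_le (l : List Int) : (pvSpan l).2.length ≤ l.length := by
  induction l with
  | nil => simp [pvSpan]
  | cons x xs ih =>
    by_cases hx : x = 0
    · simp [pvSpan, hx]
    · simp [pvSpan, hx]; omega

-- recursive run decomposition (Source B's _go); the run (x :: …) is nonempty, so getLastD's
-- default is never read (it ports run[-1])
def solve_go : List Int → Int
  | [] => 0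
  | x :: xs =>
    if _hx : x = 0 then solve_go xs
    else
      2 * (x :: (pvSpan xs).1).sum - (x :: (pvSpan xs).1).getLastD 0 + solve_go (pvSpan xs).2
termination_by l => l.length
decreasing_by
  · simp
  · have := pvSpan_snd_length_le xs; simp; omega

def solve_alt (n : Int) (h_ : List Int) : Int :=
  solve_go (if 0 < n then PySem.List.slice h_ none (some n) else [])

-- ===== PRECONDITION & SPEC =====
-- Pre_ excludes exactly the inputs where A raises IndexError: n larger than len(h).
def Pre_solve (n : Int) (h_ : List Int) : Prop := n ≤ (h_.length : Int)
instance (n : Int) (h_ : List Int) : Decidable (Pre_solve n h_) := by unfold Pre_solve; infer_instance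

def pvWitness_solve : Int × List Int := (3, [2, 0, 5])

def Spec_solve (n : Int) (h_ : List Int) (out : Int) : Prop := out = solve_alt n h_
instance (n : Int) (h_ : List Int) (out : Int) : Decidable (Spec_solve n h_ out) := by unfold Spec_solve; infer_instance

-- ===== CLAIM =====
def Claim_equal_solve : Prop := ∀ (n : Int) (h_ : List Int), Dom_solve n h_ → Pre_solve n h_ → Spec_solve n h_ (solve n h_)

-- ===== LEMMAS AND PROOFS =====

-- per-index contribution of A's loop body
def tA (h : List Int) (n i : Int) : Int :=
  if PySem.List.pyGetD h (i - 1) 0 = 0 then 0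
  else PySem.List.pyGetD h (i - 1) 0 +
    (if i ≠ n ∧ PySem.List.pyGetD h i 0 ≠ 0 then PySem.List.pyGetD h (i - 1) 0 else 0)

lemma solve_eq_sum (n : Int) (h : List Int) :
    solve n h = ((PySem.List.pyRange 1 (n + 1) 1).map (tA h n)).sum := by
  unfold solve
  rw [PySem.List.foldl_congr_mem _ _ (fun ans i => ans + tA h n i) 0
      (by
        intro acc i _
        unfold tA
        split_ifs with h1 h2 h3 <;> (simp_all; try ring))]
  simpa using PySem.List.foldl_add _ _ 0

-- common reference function: value plus adjacency bonus, structurally on the list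
def f : List Int → Int
  | [] => 0
  | [x] => x
  | x :: y :: rest => x + (if x ≠ 0 ∧ y ≠ 0 then x else 0) + f (y :: rest)

-- per-index term of the sum characterisation of f
def gfun (xs : List Int) (j : Nat) : Int :=
  xs.getD j 0 + if xs.getD j 0 ≠ 0 ∧ xs.getD (j + 1) 0 ≠ 0 then xs.getD j 0 else 0

lemma sum_gfun_cons (x : Int) (l : List Int) :
    ((List.range (x :: l).length).map (gfun (x :: l))).sum
      = gfun (x :: l) 0 + ((List.range l.length).map (gfun l)).sum := by
  rw [List.length_cons, List.range_succ_eq_map, List.map_cons, List.map_map, List.sum_cons]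
  have hmap : List.map (gfun (x :: l) ∘ Nat.succ) (List.range l.length)
      = List.map (gfun l) (List.range l.length) :=
    List.map_congr_left (fun j _ => by
      simp [Function.comp, gfun, Nat.succ_eq_add_one])
  rw [hmap]

lemma f_sum (xs : List Int) :
    f xs = ((List.range xs.length).map (gfun xs)).sum := by
  induction xs using f.induct with
  | case1 => simp [f]
  | case2 x => simp [f, gfun, List.getD]
  | case3 x y rest ih =>
    rw [f, ih]
    conv_rhs => rw [sum_gfun_cons x (y :: rest)]
    have hg : gfun (x :: y :: rest) 0 = x + (if x ≠ 0 ∧ y ≠ 0 then x else 0) := by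
      simp [gfun]
    rw [hg]

lemma reindex (g : Int → Int) (b : Int) :
    (PySem.List.pyRange 1 (b + 1) 1).map (fun i => g (i - 1))
      = (PySem.List.pyRange 0 b 1).map g := by
  rw [PySem.List.pyRange_one, PySem.List.pyRange_one]
  simp only [List.map_map]
  have hb : (b + 1 - 1).toNat = (b - 0).toNat := by omega
  rw [hb]
  apply List.map_congr_left
  intro k _
  simp only [Function.comp]
  congr 1
  ring

lemma getD_take_of_lt (h : List Int) (m k : Nat) (hk : k < m) :
    (List.take m h)[k]?.getD 0 = h[k]?.getD 0 := by
  simp [hk]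

lemma tA_eq_gfun (n : Int) (h : List Int) (k : Nat) (hn : 0 < n)
    (_hlen : n ≤ (h.length : Int)) (hk : k < n.toNat) :
    tA h n ((k : Int) + 1) = gfun (h.take n.toNat) k := by
  have e1 : (k : Int) + 1 - 1 = (k : Int) := by ring
  have e2 : (k : Int) + 1 = ((k + 1 : Nat) : Int) := by push_cast; ring
  unfold tA gfun
  rw [e1, e2, PySem.List.pyGetD_natCast, PySem.List.pyGetD_natCast]
  simp only [List.getD]
  rw [getD_take_of_lt h n.toNat k hk]
  by_cases hv : h[k]?.getD 0 = 0
  · simp [hv]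
  · by_cases hlast : k + 1 = n.toNat
    · have hEq : (k : Int) + 1 = n := by omega
      have hout : (List.take n.toNat h)[k + 1]?.getD 0 = 0 := by
        rw [List.getElem?_eq_none (by simp; omega)]; rfl
      simp [hv, hout, hEq]
    · have hlt : k + 1 < n.toNat := by omega
      have hne : (k : Int) + 1 ≠ n := by omega
      rw [getD_take_of_lt h n.toNat (k + 1) hlt]
      simp [hv, hne]

lemma sumA_eq_f (n : Int) (h : List Int) (hn : 0 < n) (hlen : n ≤ (h.length : Int)) :
    ((PySem.List.pyRange 1 (n + 1) 1).map (tA h n)).sum = f (h.take n.toNat) := by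
  have hx : (h.take n.toNat).length = n.toNat := by
    simp; omega
  rw [f_sum, hx]
  rw [List.map_congr_left (l := PySem.List.pyRange 1 (n + 1) 1)
      (f := tA h n) (g := fun i => (fun j => tA h n (j + 1)) (i - 1))
      (fun i _ => by simp only []; congr 1; ring)]
  rw [reindex (fun j => tA h n (j + 1)) n]
  rw [PySem.List.pyRange_one]
  simp only [List.map_map]
  rw [show (n - 0).toNat = n.toNat by omega]
  apply congrArg
  apply List.map_congr_left
  intro k hk
  rw [List.mem_range] at hk
  simp only [Function.comp, zero_add]
  exact tA_eq_gfun n h k hn hlen hk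

lemma f_zero_cons (xs : List Int) : f ((0 : Int) :: xs) = f xs := by
  cases xs with
  | nil => simp [f]
  | cons y t => simp [f]

lemma f_run (r : List Int) : ∀ (rest : List Int) (x : Int), x ≠ 0 →
    (∀ y ∈ r, y ≠ 0) → (rest = [] ∨ rest.headD 1 = 0) →
    f (x :: (r ++ rest)) = 2 * (x :: r).sum - (x :: r).getLastD 0 + f rest := by
  induction r with
  | nil =>
    intro rest x hx hr hrest
    cases rest with
    | nil => simp [f]; ring
    | cons z t =>
      have hz : z = 0 := by
        rcases hrest with h0 | h0
        · exact absurd h0 (by simp)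
        · simpa using h0
      subst hz
      show f (x :: 0 :: t) = _
      rw [f]
      simp
      ring
  | cons y r' ih =>
    intro rest x hx hr hrest
    have hy : y ≠ 0 := hr y (by simp)
    have hr' : ∀ z ∈ r', z ≠ 0 := fun z hz => hr z (by simp [hz])
    show f (x :: y :: (r' ++ rest)) = _
    rw [f, ih rest y hy hr' hrest]
    have hlast : (x :: y :: r').getLastD 0 = (y :: r').getLastD 0 := by
      simp
    rw [hlast]
    simp [hx, hy]
    ring

lemma pvSpan_spec (l : List Int) :
    l = (pvSpan l).1 ++ (pvSpan l).2 ∧ (∀ y ∈ (pvSpan l).1, y ≠ 0) ∧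
      ((pvSpan l).2 = [] ∨ (pvSpan l).2.headD 1 = 0) := by
  induction l with
  | nil => simp [pvSpan]
  | cons x xs ih =>
    by_cases hx : x = 0
    · subst hx; simp [pvSpan]
    · obtain ⟨h1, h2, h3⟩ := ih
      refine ⟨?_, ?_, ?_⟩
      · simp only [pvSpan, if_neg hx, List.cons_append]
        exact congrArg (x :: ·) h1
      · simp only [pvSpan, if_neg hx]
        intro y hy
        rcases List.mem_cons.1 hy with rfl | hy
        · exact hx
        · exact h2 y hy
      · simpa only [pvSpan, if_neg hx] using h3

lemma solve_go_eq_f (l : List Int) : solve_go l = f l := by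
  induction l using solve_go.induct with
  | case1 => simp [solve_go, f]
  | case2 xs ih =>
    rw [solve_go, f_zero_cons]
    simp [ih]
  | case3 x xs hx ih =>
    rw [solve_go]
    simp only [dif_neg hx]
    obtain ⟨h1, h2, h3⟩ := pvSpan_spec xs
    rw [ih]
    conv_rhs => rw [show xs = (pvSpan xs).1 ++ (pvSpan xs).2 from h1]
    rw [f_run (pvSpan xs).1 (pvSpan xs).2 x hx h2 h3]

-- ===== VERDICT =====
theorem solve_spec : Claim_equal_solve := by
  intro n h hdom hpre
  unfold Pre_solve at hpre
  unfold Spec_solve solve_alt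
  by_cases hn : 0 < n
  · rw [if_pos hn]
    rw [PySem.List.slice_to h (by omega : (0:Int) ≤ n)]
    rw [solve_go_eq_f, solve_eq_sum, sumA_eq_f n h hn hpre]
  · rw [if_neg hn]
    rw [solve_eq_sum, PySem.List.pyRange_one_eq_nil (by omega : n + 1 ≤ 1)]
    simp [solve_go]
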